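-- pv_equiv track=rewrite | github.com/pypi-data/pypi-mirror-295 | packages/cvd-color-palette-generator/cvd_color_palette_generator-0.1.tar.gz/cvd_color_palette_generator-0.1/cvd_color_palette_generator/aux_functions.py | obtener_posiciones_ordenadas_v2
-- ===== SOURCE A (Python) =====
-- def obtener_posiciones_ordenadas_v2(matrix, n):
--     """
--     Returns a list of positions (row, column) of values in the matrix that are greater than n,
--     sorted in descending order based on their values.
--     Suited for the optimized version of the matrix.
--     Args:
--         matrix (list[list[int]]): The matrix to search for values.
--         n (int): The threshold value.
--     Returns:
--         list[tuple[int, int]]: A list of positions (row, column) of values greater than n,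
--         sorted in descending order based on their values.
--     """
--
--     posiciones = []
--
--     # Recorre la matriz y almacena las posiciones de los valores mayores a n
--     for i, fila in enumerate(matrix):
--         for j, valor in enumerate(fila):
--             if valor > n:
--                 posiciones.append((i, j, valor))
--
--     # Ordena las posiciones por el valor de mayor a menor
--     posiciones.sort(key=lambda x: x[2], reverse=True)
--
--     # Devuelve solo las posiciones (fila, columna)
--     return [(i, i + j + 1) for i, j, valor in posiciones]
-- ===== SOURCE B (Python) =====
-- def obtener_posiciones_ordenadas_v2(matrix, n):
--     # Bucket positions by value, then emit buckets in descending value order.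
--     groups = {}
--     for i, fila in enumerate(matrix):
--         for j, valor in enumerate(fila):
--             if valor > n:
--                 groups.setdefault(valor, []).append((i, i + j + 1))
--     result = []
--     for valor in sorted(groups, reverse=True):
--         result.extend(groups[valor])
--     return result
-- ===== Notes on version B (the rewrite author's own statement) =====
-- stated objective: alternative
-- what changed: Instead of collecting (i,j,valor) triples and stably sorting them all, B buckets transformed positions by value in a dict during the scan and concatenates the buckets over the sorted distinct values in descending order.
import Mathlib
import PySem

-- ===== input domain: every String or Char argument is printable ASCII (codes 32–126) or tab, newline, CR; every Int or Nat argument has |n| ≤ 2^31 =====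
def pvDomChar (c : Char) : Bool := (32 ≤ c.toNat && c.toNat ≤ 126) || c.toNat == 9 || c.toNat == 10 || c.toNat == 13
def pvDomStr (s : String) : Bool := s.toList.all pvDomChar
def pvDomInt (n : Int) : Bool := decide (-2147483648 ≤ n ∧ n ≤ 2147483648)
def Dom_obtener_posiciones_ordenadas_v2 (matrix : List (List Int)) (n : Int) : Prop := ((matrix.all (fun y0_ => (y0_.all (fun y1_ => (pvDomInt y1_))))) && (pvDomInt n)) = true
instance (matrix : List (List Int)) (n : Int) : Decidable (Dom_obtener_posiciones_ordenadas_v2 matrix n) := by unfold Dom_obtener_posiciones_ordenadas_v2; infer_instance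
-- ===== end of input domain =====

-- B buckets the transformed positions by value during the scan and concatenates the buckets
-- over the sorted distinct values in descending order, instead of stably sorting all hits (objective: alternative).

-- ===== PORT A =====
def obtener_posiciones_ordenadas_v2 (matrix : List (List Int)) (n : Int) : List (Int × Int) :=
  -- posiciones = []; for i, fila in enumerate(matrix): for j, valor in enumerate(fila): if valor > n: append (i, j, valor)
  let posiciones : List (Int × Int × Int) :=
    (PySem.List.enumerate matrix).foldl (fun acc p =>
      (PySem.List.enumerate p.2).foldl (fun acc q =>
        if q.2 > n then acc ++ [(p.1, q.1, q.2)] else acc) acc) []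
  -- posiciones.sort(key=lambda x: x[2], reverse=True)
  let ordenadas := PySem.List.sorted posiciones (fun x => x.2.2) true
  -- [(i, i + j + 1) for i, j, valor in posiciones]
  ordenadas.map (fun x => (x.1, x.1 + x.2.1 + 1))

-- ===== PORT B =====
def obtener_posiciones_ordenadas_v2_alt (matrix : List (List Int)) (n : Int) : List (Int × Int) :=
  -- groups = {}; … groups.setdefault(valor, []).append((i, i + j + 1))
  let groups : PySem.Dict Int (List (Int × Int)) :=
    (PySem.List.enumerate matrix).foldl (fun d p =>
      (PySem.List.enumerate p.2).foldl (fun d q =>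
        if q.2 > n then d.modify q.2 [] (· ++ [(p.1, p.1 + q.1 + 1)]) else d) d) PySem.Dict.empty
  -- result = []; for valor in sorted(groups, reverse=True): result.extend(groups[valor])
  (PySem.List.sorted groups.keys (fun v => v) true).foldl (fun res v => res ++ groups.getD v []) []

-- ===== PRECONDITION & SPEC =====
def Spec_obtener_posiciones_ordenadas_v2 (matrix : List (List Int)) (n : Int) (out : List (Int × Int)) : Prop := out = obtener_posiciones_ordenadas_v2_alt matrix n
instance (matrix : List (List Int)) (n : Int) (out : List (Int × Int)) : Decidable (Spec_obtener_posiciones_ordenadas_v2 matrix n out) := by unfold Spec_obtener_posiciones_ordenadas_v2; infer_instance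

-- ===== CLAIM (what is proved, stated in full; the proofs are below) =====
def Claim_equal_obtener_posiciones_ordenadas_v2 : Prop := ∀ (matrix : List (List Int)) (n : Int), Dom_obtener_posiciones_ordenadas_v2 matrix n → Spec_obtener_posiciones_ordenadas_v2 matrix n (obtener_posiciones_ordenadas_v2 matrix n)

-- ===== LEMMAS AND PROOFS =====

-- the list of (i, j, valor) triples A collects, written as a flatMap
def pvTriples (matrix : List (List Int)) (n : Int) : List (Int × Int × Int) :=
  (PySem.List.enumerate matrix).flatMap (fun p =>
    ((PySem.List.enumerate p.2).filter (fun q => decide (q.2 > n))).map (fun q => (p.1, q.1, q.2)))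

theorem pvA_collect (matrix : List (List Int)) (n : Int) :
    ((PySem.List.enumerate matrix).foldl (fun acc p =>
      (PySem.List.enumerate p.2).foldl (fun acc q =>
        if q.2 > n then acc ++ [(p.1, q.1, q.2)] else acc) acc) ([] : List (Int × Int × Int))) =
    pvTriples matrix n := by
  calc ((PySem.List.enumerate matrix).foldl (fun acc p =>
      (PySem.List.enumerate p.2).foldl (fun acc q =>
        if q.2 > n then acc ++ [(p.1, q.1, q.2)] else acc) acc) ([] : List (Int × Int × Int)))
      = (PySem.List.enumerate matrix).foldl (fun acc p =>
          acc ++ ((PySem.List.enumerate p.2).filter (fun q => decide (q.2 > n))).map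
            (fun q => (p.1, q.1, q.2))) [] := by
        apply PySem.List.foldl_congr_mem
        intro acc p _
        exact PySem.List.foldl_append_ite (fun q : Int × Int => q.2 > n) (fun q => (p.1, q.1, q.2)) _ _
    _ = pvTriples matrix n := by
        rw [PySem.List.foldl_append_eq_flatMap]; rfl

-- B's dict-building double loop is the canonical "modify-append" fold over the key/value pairs of the triples
theorem pvB_dict (matrix : List (List Int)) (n : Int) :
    ((PySem.List.enumerate matrix).foldl (fun d p =>
      (PySem.List.enumerate p.2).foldl (fun d q =>
        if q.2 > n then d.modify q.2 [] (· ++ [(p.1, p.1 + q.1 + 1)]) else d) d)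
      (PySem.Dict.empty : PySem.Dict Int (List (Int × Int)))) =
    ((pvTriples matrix n).map (fun t => (t.2.2, (t.1, t.1 + t.2.1 + 1)))).foldl
      (fun d p => d.modify p.1 [] (· ++ [p.2])) PySem.Dict.empty := by
  rw [pvTriples, List.map_flatMap]
  rw [List.flatMap]
  rw [List.foldl_flatten, List.foldl_map]
  apply PySem.List.foldl_congr_mem
  intro d p _
  rw [PySem.List.foldl_ite_eq_foldl_filter (fun q : Int × Int => q.2 > n)
    (fun d q => PySem.Dict.modify d q.2 [] (· ++ [(p.1, p.1 + q.1 + 1)]))]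
  rw [List.map_map, List.foldl_map]
  simp [Function.comp]

theorem pv_insertBy_append {α : Type} (before : α → α → Bool) (x : α) (as bs : List α)
    (h : ∀ y ∈ as, before x y = false) :
    PySem.List.insertBy before x (as ++ bs) = as ++ PySem.List.insertBy before x bs := by
  induction as with
  | nil => simp
  | cons a as ih =>
    simp only [List.cons_append, PySem.List.insertBy]
    rw [h a (by simp)]
    simp [ih (fun y hy => h y (by simp [hy]))]

theorem pv_sorted_snoc {α : Type} (key : α → Int) (ts : List α) (t : α) :
    PySem.List.sorted (ts ++ [t]) key true =
      PySem.List.insertBy (fun a b => decide (key b < key a)) t (PySem.List.sorted ts key true) := by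
  rw [PySem.List.sorted_rev_eq_foldl_insertBy, PySem.List.sorted_rev_eq_foldl_insertBy, List.foldl_append]
  rfl

-- stable descending sort puts the maximal-key block (in scan order) first
theorem pv_maxb {α : Type} (key : α → Int) (m : Int) :
    ∀ ts : List α, (∀ t ∈ ts, key t ≤ m) →
    PySem.List.sorted ts key true =
      ts.filter (fun t => key t == m) ++ PySem.List.sorted (ts.filter (fun t => !(key t == m))) key true := by
  intro ts
  induction ts using List.reverseRecOn with
  | nil => simp
  | append_singleton ts t ih =>
    intro h
    have hts : ∀ t ∈ ts, key t ≤ m := fun x hx => h x (by simp [hx])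
    rw [pv_sorted_snoc, ih hts]
    by_cases hm : key t = m
    · rw [pv_insertBy_append]
      · have : PySem.List.insertBy (fun a b => decide (key b < key a)) t
            (PySem.List.sorted (ts.filter (fun t => !(key t == m))) key true) =
            t :: PySem.List.sorted (ts.filter (fun t => !(key t == m))) key true := by
          cases hs : PySem.List.sorted (ts.filter (fun t => !(key t == m))) key true with
          | nil => rfl
          | cons s0 rest =>
            have hmem : s0 ∈ ts.filter (fun t => !(key t == m)) := by
              rw [← PySem.List.mem_sorted _ key true, hs]; simp
            have hne : key s0 ≠ m := by
              have := (List.mem_filter.mp hmem).2; simpa using this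
            have hle : key s0 ≤ m := hts s0 (List.mem_filter.mp hmem).1
            have hlt : key s0 < key t := by omega
            simp [PySem.List.insertBy, hlt]
        rw [this]
        simp [List.filter_append, hm]
      · intro y hy
        have : key y = m := by simpa using (List.mem_filter.mp hy).2
        simp [this, hm]
    · rw [pv_insertBy_append]
      · rw [← pv_sorted_snoc]
        simp [List.filter_append, hm]
      · intro y hy
        have hy2 : key y = m := by simpa using (List.mem_filter.mp hy).2
        have : key t ≤ m := h t (by simp)
        simp [hy2]; omega

theorem pv_flatMap_congr {α β : Type} (l : List α) (f g : α → List β)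
    (h : ∀ x ∈ l, f x = g x) : l.flatMap f = l.flatMap g := by
  induction l with
  | nil => rfl
  | cons a l ih =>
    simp only [List.flatMap_cons, h a (by simp), ih (fun x hx => h x (by simp [hx]))]

-- stable descending sort = concatenation of the equal-key blocks over any strictly descending cover of the keys
theorem pv_group' {α : Type} (key : α → Int) :
    ∀ vs : List Int, vs.Pairwise (fun a b => b < a) →
    ∀ ts : List α, (∀ t ∈ ts, key t ∈ vs) →
    PySem.List.sorted ts key true = vs.flatMap (fun v => ts.filter (fun t => key t == v)) := by
  intro vs
  induction vs with
  | nil =>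
    intro _ ts h
    cases ts with
    | nil => rfl
    | cons a ts => exact absurd (h a (by simp)) (by simp)
  | cons m vt ih =>
    intro hp ts h
    have hvt : ∀ v ∈ vt, v < m := fun v hv => (List.pairwise_cons.mp hp).1 v hv
    have hle : ∀ t ∈ ts, key t ≤ m := by
      intro t ht
      rcases List.mem_cons.mp (h t ht) with h1 | h2
      · omega
      · exact le_of_lt (hvt _ h2)
    rw [pv_maxb key m ts hle, List.flatMap_cons]
    congr 1
    rw [ih (List.pairwise_cons.mp hp).2 (ts.filter (fun t => !(key t == m)))
      (by intro t ht
          have h2 := (List.mem_filter.mp ht).2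
          rcases List.mem_cons.mp (h t (List.mem_filter.mp ht).1) with h1 | h3
          · simp at h2; omega
          · exact h3)]
    apply pv_flatMap_congr
    intro v hv
    rw [List.filter_filter]
    apply List.filter_congr
    intro t _
    have : v ≠ m := by have := hvt v hv; omega
    cases hkv : (key t == v) with
    | false => simp
    | true =>
      have hv' : key t = v := by simpa using hkv
      simp [hv', ‹v ≠ m›]

theorem pv_group {α : Type} (key : α → Int) (ts : List α) :
    PySem.List.sorted ts key true =
      (PySem.List.sorted (PySem.Set.ofList (ts.map key)) (fun v => v) true).flatMap
        (fun v => ts.filter (fun t => key t == v)) := by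
  apply pv_group'
  · have hnd : (PySem.List.sorted (PySem.Set.ofList (ts.map key)) (fun v => v) true).Nodup :=
      (PySem.List.sorted_perm _ _ _).nodup_iff.mpr (PySem.Set.nodup_ofList _)
    have hpw := PySem.List.sorted_pairwise_rev (PySem.Set.ofList (ts.map key)) (fun v => v)
    have := List.Pairwise.and hpw hnd
    exact this.imp (by intro a b hab; rcases hab with ⟨h1, h2⟩; omega)
  · intro t ht
    rw [PySem.List.mem_sorted, PySem.Set.mem_ofList]
    exact List.mem_map_of_mem ht

-- ===== VERDICT (by name: the statement is the Claim_ definition above) =====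
theorem obtener_posiciones_ordenadas_v2_spec : Claim_equal_obtener_posiciones_ordenadas_v2 := by
  intro matrix n _
  unfold Spec_obtener_posiciones_ordenadas_v2
  unfold obtener_posiciones_ordenadas_v2 obtener_posiciones_ordenadas_v2_alt
  dsimp only
  rw [pvA_collect, pvB_dict]
  set ts := pvTriples matrix n with hts
  set pairs := ts.map (fun t => (t.2.2, (t.1, t.1 + t.2.1 + 1))) with hpairs
  set d := pairs.foldl (fun d p => d.modify p.1 [] (· ++ [p.2])) PySem.Dict.empty with hd
  have hkeys : d.keys = PySem.Set.ofList (ts.map (fun t => t.2.2)) := by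
    rw [hd, hpairs, List.foldl_map]
    rw [PySem.Dict.keys_foldl_modify_key ts (fun t => t.2.2) []
      (fun _ t => (· ++ [(t.1, t.1 + t.2.1 + 1)])) PySem.Dict.empty]
    rfl
  have hgetD : ∀ v, d.getD v [] = (ts.filter (fun t => t.2.2 == v)).map (fun t => (t.1, t.1 + t.2.1 + 1)) := by
    intro v
    rw [hd, hpairs, PySem.Dict.getD_foldl_modify_append]
    rw [List.filter_map, List.map_map]
    simp only [Function.comp_def]
    simp [PySem.Dict.getD_empty]
  rw [PySem.List.foldl_append_eq_flatMap, List.nil_append, hkeys]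
  rw [pv_group (fun t : Int × Int × Int => t.2.2) ts, List.map_flatMap]
  apply pv_flatMap_congr
  intro v _
  rw [hgetD v]
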